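-- pv_equiv track=rewrite | github.com/alexandraback/datacollection | solutions_5738606668808192_1/Python/Celeritous/coinjam.py | inner
-- ===== SOURCE A (Python) =====
-- def inner(N, J):
--     BASES = list(range(2, 10 + 1))
--     candidates = [b + 1 for b in BASES]
--     total = 0
--     for jamcoin in allJamcoins(N):
--         if all(int(jamcoin, b) % c == 0 for b, c in zip(BASES, candidates)):
--             yield jamcoin, candidates
--             total += 1
--             if total >= J:
--                 return
--
-- def allJamcoins(N):
--     variable = N - 2
--     for i in range(2**variable):
--         b = bin(i)[2:]
--         s = b.rjust(variable, "0")
--         yield "1{}1".format(s)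
-- ===== SOURCE B (Python) =====
-- def inner(N, J):
--     # Alternative algorithm: since b == -1 (mod b+1), int(coin, b) % (b+1) depends
--     # only on the alternating sum of the coin's digits, so one alternating-sum pass
--     # and one divisibility test by lcm(3..11) = 27720 replace the 9 base conversions.
--     out = []
--     cands = list(range(3, 12))
--     w = N - 2
--     for i in range(2 ** w):
--         coin = "1" + bin(i)[2:].rjust(w, "0") + "1"
--         alt = 0
--         for ch in coin:
--             alt = (1 if ch == "1" else 0) - alt
--         if alt % 27720 == 0:
--             out.append((coin, cands))
--             if len(out) >= J:
--                 break
--     return out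
-- ===== Notes on version B (the rewrite author's own statement) =====
-- stated objective: alternative
-- what changed: Replaces the nine int(coin, b) base conversions per candidate by a single alternating-digit-sum pass over the coin (b == -1 mod b+1) followed by one divisibility test by lcm(3..11) = 27720.
import Mathlib
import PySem

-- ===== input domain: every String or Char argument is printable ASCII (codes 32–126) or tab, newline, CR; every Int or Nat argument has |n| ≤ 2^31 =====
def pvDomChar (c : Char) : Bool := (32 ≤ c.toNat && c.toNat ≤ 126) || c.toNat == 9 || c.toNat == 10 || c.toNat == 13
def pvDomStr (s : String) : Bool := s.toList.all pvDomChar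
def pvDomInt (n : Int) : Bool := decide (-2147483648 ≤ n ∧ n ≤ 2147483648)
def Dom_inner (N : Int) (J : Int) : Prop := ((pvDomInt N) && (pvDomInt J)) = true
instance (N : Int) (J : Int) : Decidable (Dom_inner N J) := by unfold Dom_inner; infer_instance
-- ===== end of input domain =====

-- B replaces the nine int(coin, b) conversions per candidate by one alternating-digit-sum
-- pass and a single divisibility test by 27720 = lcm(3..11); objective: alternative algorithm.

-- ===== PORT A =====

-- bin(n)[2:]; fuel recursion mirrors the repeated-halving digit construction
def binGo : Nat → Nat → List Char
  | 0, _ => []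
  | _, 0 => []
  | f + 1, n => binGo f (n / 2) ++ [if n % 2 == 1 then '1' else '0']

def pyBin (n : Nat) : List Char := if n == 0 then ['0'] else binGo n n

-- s.rjust(w, "0")
def rjust0 (cs : List Char) (w : Nat) : List Char :=
  if cs.length < w then List.replicate (w - cs.length) '0' ++ cs else cs

-- int(s, b): exact for the strings produced here, whose characters are all '0'/'1'
def parseBase (b : Int) (cs : List Char) : Int :=
  cs.foldl (fun a c => a * b + (if c == '1' then 1 else 0)) 0

-- the coin of allJamcoins(N) at index i: "1" + bin(i)[2:].rjust(N-2, "0") + "1"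
def jamcoin (w : Nat) (i : Nat) : String :=
  String.ofList ('1' :: rjust0 (pyBin i) w ++ ['1'])

-- A's generator loop, consumed lazily: fuel counts the remaining range(2**variable) indices;
-- yield, count, early return once total >= J
def loopA (J : Int) (cands bases : List Int) (w : Nat) :
    Nat → Nat → Int → List (String × List Int) → List (String × List Int)
  | 0, _, _, ys => ys
  | fuel + 1, i, total, ys =>
    let coin := jamcoin w i
    if (bases.zip cands).all (fun bc => PySem.Int.mod (parseBase bc.1 coin.toList) bc.2 == 0) then
      let ys' := ys ++ [(coin, cands)]
      if J ≤ total + 1 then ys' else loopA J cands bases w fuel (i + 1) (total + 1) ys'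
    else loopA J cands bases w fuel (i + 1) total ys

def inner (N : Int) (J : Int) : List (String × List Int) :=
  let BASES := PySem.List.pyRange 2 11 1
  let candidates := BASES.map (· + 1)
  let variable_ := (N - 2).toNat
  loopA J candidates BASES variable_ (2 ^ variable_) 0 0 []

-- ===== PORT B =====

-- B's loop: build the coin, one alternating-sum pass over its characters, one mod test;
-- fuel counts the remaining range(2**w) indices
def loopB (J : Int) (cands : List Int) (w : Nat) : Nat → Nat → List (String × List Int) → List (String × List Int)
  | 0, _, out => out
  | fuel + 1, i, out =>
    let coin := String.ofList ('1' :: rjust0 (pyBin i) w ++ ['1'])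
    let alt := coin.toList.foldl (fun a c => (if c == '1' then (1 : Int) else 0) - a) 0
    if PySem.Int.mod alt 27720 == 0 then
      let out' := out ++ [(coin, cands)]
      if J ≤ (out'.length : Int) then out' else loopB J cands w fuel (i + 1) out'
    else loopB J cands w fuel (i + 1) out

def inner_alt (N : Int) (J : Int) : List (String × List Int) :=
  loopB J (PySem.List.pyRange 3 12 1) (N - 2).toNat (2 ^ (N - 2).toNat) 0 []

-- ===== PRECONDITION & SPEC =====
-- A raises TypeError for N < 2 (range(2 ** negative) is range of a float); Pre_ excludes exactly those.
def Pre_inner (N : Int) (J : Int) : Prop := 2 ≤ N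
instance (N : Int) (J : Int) : Decidable (Pre_inner N J) := by unfold Pre_inner; infer_instance
def pvWitness_inner : Int × Int := (4, 1)

def Spec_inner (N : Int) (J : Int) (out : List (String × List Int)) : Prop := out = inner_alt N J
instance (N : Int) (J : Int) (out : List (String × List Int)) : Decidable (Spec_inner N J out) := by unfold Spec_inner; infer_instance

-- ===== CLAIM (what is proved, stated in full; the proofs are below) =====
def Claim_equal_inner : Prop := ∀ (N : Int) (J : Int), Dom_inner N J → Pre_inner N J → Spec_inner N J (inner N J)

-- ===== LEMMAS AND PROOFS =====

-- Horner in base (m-1) and alternating Horner agree mod m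
theorem horner_mod (m : Int) (cs : List Char) :
    ∀ a₁ a₂ : Int, a₁ % m = a₂ % m →
      (cs.foldl (fun a c => a * (m - 1) + (if c == '1' then 1 else 0)) a₁) % m
        = (cs.foldl (fun a c => (if c == '1' then (1 : Int) else 0) - a) a₂) % m := by
  induction cs with
  | nil => intro a₁ a₂ h; simpa using h
  | cons c cs ih =>
    intro a₁ a₂ h
    simp only [List.foldl_cons]
    apply ih
    set χ : Int := if c == '1' then 1 else 0 with hχ
    have h1 : (a₁ * (m - 1) + χ) % m = (a₂ * (m - 1) + χ) % m := by
      rw [Int.add_emod, Int.mul_emod, h, ← Int.mul_emod, ← Int.add_emod]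
    have h2 : a₂ * (m - 1) + χ = (χ - a₂) + a₂ * m := by ring
    rw [h1, h2, Int.add_mul_emod_self_right]

theorem parse_mod (b m : Int) (hm : m = b + 1) (cs : List Char) :
    (parseBase b cs) % m
      = (cs.foldl (fun a c => (if c == '1' then (1 : Int) else 0) - a) 0) % m := by
  have hb : b = m - 1 := by omega
  subst hb
  exact horner_mod m cs 0 0 rfl

-- lcm arithmetic: divisibility by every base+1 is divisibility by 27720
theorem coprime_int (a b : Int) (h : Int.gcd a b = 1) : IsCoprime a b :=
  Int.isCoprime_iff_gcd_eq_one.mpr h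

theorem alldvd (S : Int) :
    ((3:Int) ∣ S ∧ (4:Int) ∣ S ∧ (5:Int) ∣ S ∧ (6:Int) ∣ S ∧ (7:Int) ∣ S ∧ (8:Int) ∣ S ∧
      (9:Int) ∣ S ∧ (10:Int) ∣ S ∧ (11:Int) ∣ S) ↔ (27720:Int) ∣ S := by
  constructor
  · rintro ⟨-, -, h5, -, h7, h8, h9, -, h11⟩
    have h72 : (72:Int) ∣ S := (coprime_int 8 9 (by norm_num)).mul_dvd h8 h9
    have h360 : (360:Int) ∣ S := (coprime_int 72 5 (by norm_num)).mul_dvd h72 h5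
    have h2520 : (2520:Int) ∣ S := (coprime_int 360 7 (by norm_num)).mul_dvd h360 h7
    exact (coprime_int 2520 11 (by norm_num)).mul_dvd h2520 h11
  · intro h
    exact ⟨dvd_trans (by norm_num) h, dvd_trans (by norm_num) h, dvd_trans (by norm_num) h,
      dvd_trans (by norm_num) h, dvd_trans (by norm_num) h, dvd_trans (by norm_num) h,
      dvd_trans (by norm_num) h, dvd_trans (by norm_num) h, dvd_trans (by norm_num) h⟩

-- the per-coin tests of A and B coincide
theorem cond_eq (cs : List Char) :
    ((([2, 3, 4, 5, 6, 7, 8, 9, 10] : List Int).zip ([3, 4, 5, 6, 7, 8, 9, 10, 11] : List Int)).all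
        (fun bc => PySem.Int.mod (parseBase bc.1 cs) bc.2 == 0))
      = (PySem.Int.mod (cs.foldl (fun a c => (if c == '1' then (1 : Int) else 0) - a) 0) 27720 == 0) := by
  have hp : ∀ b m : Int, m = b + 1 → 0 < m →
      (PySem.Int.mod (parseBase b cs) m == 0)
        = ((cs.foldl (fun a c => (if c == '1' then (1 : Int) else 0) - a) 0) % m == 0) := by
    intro b m hm h0
    rw [PySem.Int.mod_eq_emod_of_pos h0, parse_mod b m hm]
  show (_ && (_ && (_ && (_ && (_ && (_ && (_ && (_ && (_ && true))))))))) = _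
  beta_reduce
  rw [hp 2 3 rfl (by norm_num), hp 3 4 rfl (by norm_num), hp 4 5 rfl (by norm_num),
    hp 5 6 rfl (by norm_num), hp 6 7 rfl (by norm_num), hp 7 8 rfl (by norm_num),
    hp 8 9 rfl (by norm_num), hp 9 10 rfl (by norm_num), hp 10 11 rfl (by norm_num),
    PySem.Int.mod_eq_emod_of_pos (by norm_num : (0 : Int) < 27720)]
  generalize cs.foldl (fun a c => (if c == '1' then (1 : Int) else 0) - a) 0 = S
  rw [Bool.eq_iff_iff]
  simp only [Bool.and_eq_true, beq_iff_eq, and_true, PySem.Int.emod_eq_zero_iff_dvd]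
  exact alldvd S

-- the two loops produce the same output from matching states
theorem loop_eq (J : Int) (w : Nat) :
    ∀ (fuel i : Nat) (total : Int) (out : List (String × List Int)), total = (out.length : Int) →
      loopB J ([3, 4, 5, 6, 7, 8, 9, 10, 11] : List Int) w fuel i out
        = loopA J ([3, 4, 5, 6, 7, 8, 9, 10, 11] : List Int)
            ([2, 3, 4, 5, 6, 7, 8, 9, 10] : List Int) w fuel i total out := by
  intro fuel
  induction fuel with
  | zero => intro i total out h; simp [loopA, loopB]
  | succ fuel ih =>
    intro i total out h
    simp only [loopA, loopB, jamcoin]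
    rw [cond_eq]
    split
    · have hlen : ((out ++ [((String.ofList ('1' :: rjust0 (pyBin i) w ++ ['1'])),
          ([3, 4, 5, 6, 7, 8, 9, 10, 11] : List Int))]).length : Int) = total + 1 := by
        simp [h]
      rw [hlen]
      split
      · rfl
      · exact ih (i + 1) (total + 1) _ hlen.symm
    · exact ih (i + 1) total out h

theorem pyRange_2_11 : PySem.List.pyRange 2 11 1 = ([2, 3, 4, 5, 6, 7, 8, 9, 10] : List Int) := by decide
theorem pyRange_3_12 : PySem.List.pyRange 3 12 1 = ([3, 4, 5, 6, 7, 8, 9, 10, 11] : List Int) := by decide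

-- ===== VERDICT (by name: the statement is the Claim_ definition above) =====
theorem inner_spec : Claim_equal_inner := by
  intro N J _ _
  unfold Spec_inner _root_.inner inner_alt
  rw [pyRange_2_11, pyRange_3_12]
  exact (loop_eq J (N - 2).toNat _ 0 0 [] (by simp)).symm
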